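-- pv_equiv track=rewrite | github.com/Priyansh-max/Mira-VoiceAgent | backend/text_agent.py | _looks_like_conversation_end
-- ===== SOURCE A (Python) =====
-- def _looks_like_conversation_end(text: str) -> bool:
--     lowered = text.lower()
--     closing_phrases = [
--         "thank you",
--         "thanks",
--         "that's all",
--         "thats all",
--         "that's it",
--         "thats it",
--         "no that's it",
--         "no thats it",
--         "bye",
--         "goodbye",
--         "see you",
--         "no that's all",
--         "no thats all",
--         "nothing else",
--         "all good",
--     ]
--     return any(phrase in lowered for phrase in closing_phrases)
-- ===== SOURCE B (Python) =====
-- CLOSING_PHRASES = (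
--     "thank you", "thanks", "that's all", "thats all", "that's it",
--     "thats it", "no that's it", "no thats it", "bye", "goodbye",
--     "see you", "no that's all", "no thats all", "nothing else", "all good",
-- )
--
-- def _looks_like_conversation_end(text: str) -> bool:
--     # single left-to-right scan over positions; at each position test whether
--     # some closing phrase starts there
--     lowered = text.lower()
--     for i in range(len(lowered) + 1):
--         for phrase in CLOSING_PHRASES:
--             if lowered.startswith(phrase, i):
--                 return True
--     return False
-- ===== Notes on version B (the rewrite author's own statement) =====
-- stated objective: alternative
-- what changed: Replaced the per-phrase substring-membership loop by a single left-to-right scan over text positions that tests at each position whether any closing phrase starts there via startswith, so the outer loop traverses the text once instead of once per phrase.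
import Mathlib
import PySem

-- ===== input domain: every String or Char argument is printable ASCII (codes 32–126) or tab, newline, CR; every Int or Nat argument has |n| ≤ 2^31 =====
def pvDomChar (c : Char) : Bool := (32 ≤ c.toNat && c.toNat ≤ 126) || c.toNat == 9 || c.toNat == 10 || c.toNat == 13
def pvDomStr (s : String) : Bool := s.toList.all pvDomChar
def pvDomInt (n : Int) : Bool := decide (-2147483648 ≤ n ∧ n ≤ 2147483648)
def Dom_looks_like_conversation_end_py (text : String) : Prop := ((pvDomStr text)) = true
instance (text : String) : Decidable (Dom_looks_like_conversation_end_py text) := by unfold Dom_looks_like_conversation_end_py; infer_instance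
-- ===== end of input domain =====

-- B replaces the per-phrase substring-membership loop by a single scan over text
-- positions testing at each position whether some closing phrase starts there
-- (objective: alternative; same result, different traversal).

-- the closing-phrase list shared by both modules (identical contents)
def pvClosingPhrases : List String :=
  ["thank you", "thanks", "that's all", "thats all", "that's it", "thats it",
   "no that's it", "no thats it", "bye", "goodbye", "see you",
   "no that's all", "no thats all", "nothing else", "all good"]

-- ===== PORT A =====
def looks_like_conversation_end_py (text : String) : Bool :=
  let lowered := PySem.Str.lower text
  pvClosingPhrases.any (fun phrase => PySem.Str.isIn phrase lowered)

-- ===== PORT B =====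
-- the inner 'for phrase … lowered.startswith(phrase, i)' loop at one position i
-- (the suffix of lowered starting at i), then recursion = the outer position scan
def pvAltScan (ps : List (List Char)) : List Char → Bool
  | [] => ps.any (fun p => PySem.Chars.startswith [] p)
  | c :: rest => ps.any (fun p => PySem.Chars.startswith (c :: rest) p) || pvAltScan ps rest

def looks_like_conversation_end_py_alt (text : String) : Bool :=
  pvAltScan (pvClosingPhrases.map String.toList) (PySem.Str.lower text).toList

-- ===== PRECONDITION & SPEC =====
def Spec_looks_like_conversation_end_py (text : String) (out : Bool) : Prop := out = looks_like_conversation_end_py_alt text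
instance (text : String) (out : Bool) : Decidable (Spec_looks_like_conversation_end_py text out) := by unfold Spec_looks_like_conversation_end_py; infer_instance

-- ===== CLAIM (what is proved, stated in full; the proofs are below) =====
def Claim_equal_looks_like_conversation_end_py : Prop := ∀ (text : String), Dom_looks_like_conversation_end_py text → Spec_looks_like_conversation_end_py text (looks_like_conversation_end_py text)

-- ===== LEMMAS AND PROOFS =====

-- the position scan finds a match iff some phrase is a prefix of some suffix
theorem pvAltScan_iff (ps : List (List Char)) (cs : List Char) :
    pvAltScan ps cs = true ↔ ∃ j, (ps.any (fun p => PySem.Chars.startswith (cs.drop j) p)) = true := by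
  induction cs with
  | nil =>
      simp [pvAltScan]
  | cons c rest ih =>
      simp only [pvAltScan, Bool.or_eq_true, ih]
      constructor
      · rintro (h | ⟨j, hj⟩)
        · exact ⟨0, h⟩
        · exact ⟨j + 1, hj⟩
      · rintro ⟨j, hj⟩
        cases j with
        | zero => exact Or.inl hj
        | succ k => exact Or.inr ⟨k, hj⟩

theorem looks_like_conversation_end_eq (text : String) :
    looks_like_conversation_end_py text = looks_like_conversation_end_py_alt text := by
  rw [Bool.eq_iff_iff]
  simp only [looks_like_conversation_end_py, looks_like_conversation_end_py_alt,
    pvAltScan_iff, List.any_eq_true, List.mem_map, PySem.Chars.startswith_iff,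
    PySem.Str.isIn_iff_infix]
  constructor
  · rintro ⟨p, hp, hinf⟩
    obtain ⟨j, hpref⟩ := (PySem.Chars.exists_prefix_drop_iff_isIn p.toList
        (PySem.Str.lower text).toList).mpr ((PySem.Chars.isIn_iff_infix _ _).mpr hinf)
    exact ⟨j, _, ⟨p, hp, rfl⟩, hpref⟩
  · rintro ⟨j, _, ⟨p, hp, rfl⟩, hpref⟩
    exact ⟨p, hp, (PySem.Chars.isIn_iff_infix _ _).mp
      ((PySem.Chars.exists_prefix_drop_iff_isIn _ _).mp ⟨j, hpref⟩)⟩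

-- ===== VERDICT (by name: the statement is the Claim_ definition above) =====
theorem looks_like_conversation_end_py_spec : Claim_equal_looks_like_conversation_end_py := by
  intro text _
  exact looks_like_conversation_end_eq text
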